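-- pv_equiv track=rewrite | github.com/eavh218-source/HardHits | python/export_sql_to_static.py | pick_best_date
-- ===== SOURCE A (Python) =====
-- def pick_best_date(dates: list[str], preferred: str) -> str | None:
--     if not dates:
--         return None
--     if preferred in dates:
--         return preferred
--     before = [d for d in dates if d <= preferred]
--     if before:
--         return before[-1]
--     return dates[-1]
-- ===== SOURCE B (Python) =====
-- def pick_best_date(dates: list[str], preferred: str) -> str | None:
--     rev = dates[::-1]
--     for i, d in enumerate(rev):
--         if d == preferred:
--             return preferred
--         if d <= preferred:
--             # d is the last element <= preferred in original order; preferred can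
--             # only occur among the elements before it (later in rev)
--             return preferred if preferred in rev[i + 1:] else d
--     return rev[0] if rev else None
-- ===== Notes on version B (the rewrite author's own statement) =====
-- stated objective: alternative
-- what changed: Scans the reversed list with early exit: stops at the first element from the right that is <= preferred and decides between it and preferred by one membership test on the remaining prefix, instead of a full membership test plus a filter comprehension over the whole list.
import Mathlib
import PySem

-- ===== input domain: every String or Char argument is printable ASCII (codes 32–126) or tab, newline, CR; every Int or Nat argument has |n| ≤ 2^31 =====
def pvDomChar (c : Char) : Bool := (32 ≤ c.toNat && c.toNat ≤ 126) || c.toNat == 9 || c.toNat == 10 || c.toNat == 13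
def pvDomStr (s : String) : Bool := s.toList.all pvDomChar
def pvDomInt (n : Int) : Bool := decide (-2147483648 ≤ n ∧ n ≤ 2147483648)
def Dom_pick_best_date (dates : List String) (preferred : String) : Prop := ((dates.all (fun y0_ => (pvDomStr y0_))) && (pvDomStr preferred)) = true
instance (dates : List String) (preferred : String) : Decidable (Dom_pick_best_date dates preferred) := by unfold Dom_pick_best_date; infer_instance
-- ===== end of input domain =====

-- B scans the reversed list with early exit (first element from the right that is ≤ preferred
-- decides the answer via one membership test on the rest) instead of A's full membership test
-- plus filter comprehension (objective: alternative decomposition, same cost).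

-- ===== PORT A =====
def pick_best_date (dates : List String) (preferred : String) : Option String :=
  if dates = [] then none
  else if dates.contains preferred then some preferred
  else
    let before := dates.filter (fun d => decide (d ≤ preferred))
    if before ≠ [] then before.getLast?
    else dates.getLast?

-- ===== PORT B =====
-- the early-exit loop over the reversed list (rev[i+1:] is `rest` in the recursion)
def pbd_scan (preferred : String) : List String → Option String
  | [] => none
  | d :: rest =>
    if d == preferred then some preferred
    else if d ≤ preferred then some (if rest.contains preferred then preferred else d)
    else pbd_scan preferred rest

def pick_best_date_alt (dates : List String) (preferred : String) : Option String :=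
  let rev := dates.reverse
  match pbd_scan preferred rev with
  | some r => some r
  | none => if rev ≠ [] then rev.head? else none

-- ===== PRECONDITION & SPEC =====
def Spec_pick_best_date (dates : List String) (preferred : String) (out : Option String) : Prop := out = pick_best_date_alt dates preferred
instance (dates : List String) (preferred : String) (out : Option String) : Decidable (Spec_pick_best_date dates preferred out) := by unfold Spec_pick_best_date; infer_instance

-- ===== CLAIM (what is proved, stated in full; the proofs are below) =====
def Claim_equal_pick_best_date : Prop := ∀ (dates : List String) (preferred : String), Dom_pick_best_date dates preferred → Spec_pick_best_date dates preferred (pick_best_date dates preferred)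

-- ===== LEMMAS AND PROOFS =====

theorem pbd_scan_char (preferred : String) (l : List String) :
    pbd_scan preferred l =
      if l.contains preferred then some preferred
      else (l.filter (fun d => decide (d ≤ preferred))).head? := by
  induction l with
  | nil => rfl
  | cons d rest ih =>
    by_cases h1 : d = preferred
    · subst h1; simp [pbd_scan]
    · have hne : (d == preferred) = false := by simp [h1]
      have hpd : (preferred == d) = false := by
        simp only [beq_eq_false_iff_ne, ne_eq]; exact fun h => h1 h.symm
      have hcc : (d :: rest).contains preferred = rest.contains preferred := by
        rw [List.contains_cons, hpd, Bool.false_or]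
      by_cases h2 : d ≤ preferred
      · have hp : decide (d ≤ preferred) = true := by simp [h2]
        simp only [pbd_scan, hne, Bool.false_eq_true, if_false, if_pos h2, hcc,
          List.filter_cons, hp, if_true]
        cases hc : rest.contains preferred <;> simp
      · have hp : decide (d ≤ preferred) = false := by simp [h2]
        simp only [pbd_scan, hne, Bool.false_eq_true, if_false, if_neg h2, hcc,
          List.filter_cons, hp, ih]

theorem pick_best_date_eq (dates : List String) (preferred : String) :
    pick_best_date dates preferred = pick_best_date_alt dates preferred := by
  unfold pick_best_date pick_best_date_alt
  dsimp only
  rw [pbd_scan_char]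
  have hcon : dates.reverse.contains preferred = dates.contains preferred := by
    simp
  have hfilt : (dates.reverse.filter (fun d => decide (d ≤ preferred))).head?
      = (dates.filter (fun d => decide (d ≤ preferred))).getLast? := by
    rw [List.filter_reverse, List.head?_reverse]
  rw [hcon, hfilt]
  by_cases hnil : dates = []
  · subst hnil; rfl
  · rw [if_neg hnil]
    by_cases hc : dates.contains preferred = true
    · have hm : preferred ∈ dates := by simpa using hc
      simp [hm]
    · rw [if_neg hc, if_neg hc]
      cases hl : (dates.filter (fun d => decide (d ≤ preferred))).getLast? with
      | none =>
        have hfe : dates.filter (fun d => decide (d ≤ preferred)) = [] :=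
          List.getLast?_eq_none_iff.mp hl
        rw [if_neg (not_not_intro hfe)]
        have hrne : dates.reverse ≠ [] := by simpa using hnil
        rw [if_pos hrne, List.head?_reverse]
      | some x =>
        have hfne : dates.filter (fun d => decide (d ≤ preferred)) ≠ [] := by
          intro h; rw [h] at hl; cases hl
        rw [if_pos hfne]

-- ===== VERDICT (by name: the statement is the Claim_ definition above) =====
theorem pick_best_date_spec : Claim_equal_pick_best_date := by
  intro dates preferred _
  unfold Spec_pick_best_date
  exact pick_best_date_eq dates preferred
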